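-- pv_equiv track=rewrite | github.com/mikeng07/hangman-lists-python | main.py | get_letter_remaining
-- ===== SOURCE A (Python) =====
-- def get_letter_remaining(incorrect, correct):
--     # return list of remaining letters in the alphabet to choose from
--     # remove both correct and incorrect from the remaining
--     alpha = ["A", "B", "C", "D", "E", "F", "G", "H", "I", "J", "K", "L", "M", "N", "O", "P", "Q", "R", "S", "T", "U", "V", "W", "X", "Y", "Z"]
--
--     for l in incorrect:
--         if l in alpha:
--             alpha.remove(l)
--
--     for l in correct:
--         if l in alpha:
--             alpha.remove(l)
--
--     return alpha
-- ===== SOURCE B (Python) =====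
-- ALPHA = ["A", "B", "C", "D", "E", "F", "G", "H", "I", "J", "K", "L", "M",
--          "N", "O", "P", "Q", "R", "S", "T", "U", "V", "W", "X", "Y", "Z"]
--
-- def get_letter_remaining(incorrect, correct):
--     # remaining alphabet letters: filter the fixed alphabet by one membership set
--     used = set(incorrect) | set(correct)
--     return [c for c in ALPHA if c not in used]
-- ===== Notes on version B (the rewrite author's own statement) =====
-- stated objective: idiomatic
-- what changed: B inverts the traversal: instead of looping over the two input lists and destructively removing letters from a mutable alphabet list, it builds one membership set of used letters and filters the fixed alphabet in a single comprehension.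
import Mathlib
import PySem

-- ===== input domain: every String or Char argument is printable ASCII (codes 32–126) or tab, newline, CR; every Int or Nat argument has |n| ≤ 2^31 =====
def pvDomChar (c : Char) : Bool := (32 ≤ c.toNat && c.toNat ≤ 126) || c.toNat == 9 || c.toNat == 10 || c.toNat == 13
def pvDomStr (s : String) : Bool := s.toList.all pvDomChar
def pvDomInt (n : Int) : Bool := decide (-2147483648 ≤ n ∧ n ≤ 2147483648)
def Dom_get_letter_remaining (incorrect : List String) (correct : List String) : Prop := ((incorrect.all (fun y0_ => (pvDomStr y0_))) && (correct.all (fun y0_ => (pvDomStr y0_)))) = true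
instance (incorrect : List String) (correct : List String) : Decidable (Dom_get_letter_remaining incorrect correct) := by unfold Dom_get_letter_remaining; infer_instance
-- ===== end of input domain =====

-- B filters the fixed alphabet by one membership set instead of removing from a mutable list (idiomatic; same results).
-- ===== PORT A =====
def pvAlpha : List String := ["A", "B", "C", "D", "E", "F", "G", "H", "I", "J", "K", "L", "M", "N", "O", "P", "Q", "R", "S", "T", "U", "V", "W", "X", "Y", "Z"]

-- 'if l in alpha: alpha.remove(l)'  (guarded, so remove never raises; remove? is some here)
def pvRemoveStep (alpha : List String) (l : String) : List String :=
  if alpha.contains l then (PySem.List.remove? alpha l).getD alpha else alpha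

def get_letter_remaining (incorrect : List String) (correct : List String) : List String :=
  let alpha := pvAlpha
  let alpha := incorrect.foldl pvRemoveStep alpha
  let alpha := correct.foldl pvRemoveStep alpha
  alpha

-- ===== PORT B =====
def get_letter_remaining_alt (incorrect : List String) (correct : List String) : List String :=
  let used : PySem.Set String := PySem.Set.union (PySem.Set.ofList incorrect) (PySem.Set.ofList correct)
  pvAlpha.filter (fun c => ¬ PySem.Set.contains used c)

-- ===== PRECONDITION & SPEC =====
def Spec_get_letter_remaining (incorrect : List String) (correct : List String) (out : List String) : Prop := out = get_letter_remaining_alt incorrect correct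
instance (incorrect : List String) (correct : List String) (out : List String) : Decidable (Spec_get_letter_remaining incorrect correct out) := by unfold Spec_get_letter_remaining; infer_instance

-- ===== CLAIM (what is proved, stated in full; the proofs are below) =====
def Claim_equal_get_letter_remaining : Prop := ∀ (incorrect : List String) (correct : List String), Dom_get_letter_remaining incorrect correct → Spec_get_letter_remaining incorrect correct (get_letter_remaining incorrect correct)

-- ===== LEMMAS AND PROOFS =====

-- ===== VERDICT (by name: the statement is the Claim_ definition above) =====
theorem pvRemoveStep_nodup_eq (s : List String) (l : String) (h : s.Nodup) :
    pvRemoveStep s l = s.filter (fun c => !(c == l)) := by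
  unfold pvRemoveStep
  by_cases hm : l ∈ s
  · rw [if_pos (by simpa using hm), PySem.List.remove?_eq_some_erase s l hm, Option.getD_some,
      h.erase_eq_filter]
    simp [bne]
  · rw [if_neg (by simpa using hm)]
    symm
    apply List.filter_eq_self.mpr
    intro a ha
    simp only [Bool.not_eq_eq_eq_not, Bool.not_true, beq_eq_false_iff_ne]
    rintro rfl; exact hm ha

theorem pvFold_remove (ls : List String) (s : List String) (h : s.Nodup) :
    ls.foldl pvRemoveStep s = s.filter (fun c => !ls.contains c) := by
  induction ls generalizing s with
  | nil => simp
  | cons l t ih =>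
    rw [List.foldl_cons, pvRemoveStep_nodup_eq s l h, ih _ (h.filter _),
      List.filter_filter]
    apply List.filter_congr
    intro a _
    by_cases hal : a = l <;> simp [hal, Bool.and_comm]

theorem pvAlpha_nodup : pvAlpha.Nodup := by decide

theorem get_letter_remaining_spec : Claim_equal_get_letter_remaining := by
  intro incorrect correct _
  show _ = _
  unfold get_letter_remaining get_letter_remaining_alt
  dsimp only
  rw [pvFold_remove incorrect pvAlpha pvAlpha_nodup,
    pvFold_remove correct _ (pvAlpha_nodup.filter _), List.filter_filter]
  apply List.filter_congr
  intro a _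
  simp [PySem.Set.contains, PySem.Set.mem_union, PySem.Set.mem_ofList, Bool.and_comm]
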